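-- pv_equiv track=rewrite | github.com/pypi-data/pypi-mirror-131 | packages/emBRICK/emBRICK-0.09.tar.gz/emBRICK-0.09/emBRICK/modbus_rtu.py | addBytes
-- ===== SOURCE A (Python) =====
-- def addBytes(list8bit):
--     list16bit = []
--     if not len(list8bit) // 2:
--         list8bit.append(0)
--     for num in range(len(list8bit)):
--         if not num % 2:
--             byte0 = list8bit[num] << 8
--         else:
--             byte1 = list8bit[num]
--             byte = byte0 + byte1
--             list16bit.append(byte)
--     return list16bit
-- ===== SOURCE B (Python) =====
-- def addBytes(list8bit):
--     # same in-place guard as the original: pad to one pair if fewer than 2 bytes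
--     if len(list8bit) < 2:
--         list8bit.append(0)
--     return [(list8bit[i] << 8) + list8bit[i + 1]
--             for i in range(0, len(list8bit) - 1, 2)]
-- ===== Notes on version B (the rewrite author's own statement) =====
-- stated objective: simpler
-- what changed: Replaces the per-index loop with a num%2 parity toggle and a carried byte0 register by a single comprehension over a step-2 range that packs each (high, low) pair directly, dropping any trailing unpaired byte by construction.
import Mathlib
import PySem

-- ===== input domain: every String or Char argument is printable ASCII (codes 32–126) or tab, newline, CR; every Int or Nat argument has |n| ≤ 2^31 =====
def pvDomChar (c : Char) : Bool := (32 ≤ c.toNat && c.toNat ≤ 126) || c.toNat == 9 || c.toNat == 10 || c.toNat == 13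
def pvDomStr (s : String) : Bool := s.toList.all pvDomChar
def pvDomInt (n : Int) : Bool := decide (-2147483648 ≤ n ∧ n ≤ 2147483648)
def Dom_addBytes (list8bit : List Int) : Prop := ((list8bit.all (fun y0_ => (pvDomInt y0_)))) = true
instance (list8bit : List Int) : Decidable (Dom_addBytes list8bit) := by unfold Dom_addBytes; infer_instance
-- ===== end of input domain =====

-- B replaces A's parity-toggle loop with a direct comprehension over a step-2 range (simpler);
-- A mutates its argument (appends 0 when shorter than 2); the equivalence proved is about the return value.

-- ===== PORT A =====
-- 'x << 8' on a Python int is exactly x * 256 (arbitrary-precision, no truncation).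
def addBytes (list8bit : List Int) : List Int :=
  let list16bit : List Int := []
  let l := if list8bit.length / 2 = 0 then list8bit ++ [0] else list8bit
  ((PySem.List.pyRange 0 (l.length : Int) 1).foldl
    (fun (st : Int × List Int) num =>
      if num % 2 = 0 then
        (PySem.List.pyGetD l num 0 * 256, st.2)
      else
        let byte1 := PySem.List.pyGetD l num 0
        let byte := st.1 + byte1
        (st.1, st.2 ++ [byte]))
    (0, list16bit)).2

-- ===== PORT B =====
def addBytes_alt (list8bit : List Int) : List Int :=
  let l := if list8bit.length < 2 then list8bit ++ [0] else list8bit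
  (PySem.List.pyRange 0 ((l.length : Int) - 1) 2).map
    (fun i => PySem.List.pyGetD l i 0 * 256 + PySem.List.pyGetD l (i + 1) 0)

-- ===== PRECONDITION & SPEC =====
def Spec_addBytes (list8bit : List Int) (out : List Int) : Prop := out = addBytes_alt list8bit
instance (list8bit : List Int) (out : List Int) : Decidable (Spec_addBytes list8bit out) := by unfold Spec_addBytes; infer_instance

-- ===== CLAIM (what is proved, stated in full; the proofs are below) =====
def Claim_equal_addBytes : Prop := ∀ (list8bit : List Int), Dom_addBytes list8bit → Spec_addBytes list8bit (addBytes list8bit)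

-- ===== LEMMAS AND PROOFS =====

-- the common mathematical value: consecutive pairs packed high*256 + low, trailing byte dropped
def pvPairs : List Int → List Int
  | a :: b :: t => (a * 256 + b) :: pvPairs t
  | _ => []

lemma pvPairs_short (t : List Int) (h : t.length ≤ 1) : pvPairs t = [] := by
  match t, h with
  | [], _ => rfl
  | [_], _ => rfl

lemma pyRange_two_cons (a b : Int) (h : a < b) :
    PySem.List.pyRange a b 2 = a :: PySem.List.pyRange (a + 2) b 2 := by
  rw [PySem.List.pyRange_of_pos a b (by norm_num), PySem.List.pyRange_of_pos (a + 2) b (by norm_num)]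
  have hcnt : (if a < b then ((b - a + 2 - 1) / 2).toNat else 0)
      = (if a + 2 < b then ((b - (a + 2) + 2 - 1) / 2).toNat else 0) + 1 := by
    split_ifs <;> omega
  rw [hcnt, List.range_succ_eq_map, List.map_cons, List.map_map]
  refine congrArg₂ _ (by ring) (List.map_congr_left fun k _ => ?_)
  simp only [Function.comp_apply]; push_cast; ring

lemma pyRange_two_nil (a b : Int) (h : b ≤ a) : PySem.List.pyRange a b 2 = [] := by
  rw [PySem.List.pyRange_of_pos a b (by norm_num), if_neg (by omega)]
  rfl

lemma pvGet (l : List Int) (i : Int) (k : Nat) (hik : i = (k : Int)) (hk : k < l.length) :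
    PySem.List.pyGetD l i 0 = l[k] := by
  subst hik
  rw [PySem.List.pyGetD_natCast, List.getD_eq_getElem?_getD, List.getElem?_eq_getElem hk,
      Option.getD_some]

lemma foldA (l : List Int) : ∀ (m j : Nat) (b0 : Int) (acc : List Int),
    l.length ≤ 2 * j + m →
    ((PySem.List.pyRange (2 * (j : Int)) (l.length : Int) 1).foldl
      (fun (st : Int × List Int) num =>
        if num % 2 = 0 then (PySem.List.pyGetD l num 0 * 256, st.2)
        else (st.1, st.2 ++ [st.1 + PySem.List.pyGetD l num 0]))
      (b0, acc)).2 = acc ++ pvPairs (l.drop (2 * j)) := by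
  intro m
  induction m with
  | zero =>
    intro j b0 acc h
    rw [PySem.List.pyRange_one_eq_nil (by omega), List.drop_eq_nil_of_le (by omega),
        List.foldl_nil]
    simp [pvPairs]
  | succ m ih =>
    intro j b0 acc h
    by_cases h1 : l.length ≤ 2 * j
    · rw [PySem.List.pyRange_one_eq_nil (by omega), List.drop_eq_nil_of_le (by omega),
          List.foldl_nil]
      simp [pvPairs]
    · by_cases h2 : l.length = 2 * j + 1
      · rw [PySem.List.pyRange_one_cons (by omega), PySem.List.pyRange_one_eq_nil (by omega)]
        rw [List.foldl_cons, if_pos (by omega), List.foldl_nil]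
        have hd : l.drop (2 * j) = [l[2 * j]'(by omega)] := by
          rw [List.drop_eq_getElem_cons (by omega), List.drop_eq_nil_of_le (by omega)]
        rw [hd]; simp [pvPairs]
      · have hlt : 2 * j + 2 ≤ l.length := by omega
        rw [PySem.List.pyRange_one_cons (by omega), PySem.List.pyRange_one_cons (by omega)]
        rw [List.foldl_cons, if_pos (by omega), List.foldl_cons, if_neg (by omega)]
        have e3 : (2 * (j : Int) + 1 + 1) = 2 * ((j + 1 : Nat) : Int) := by push_cast; ring
        rw [e3, ih (j + 1) _ _ (by omega)]
        rw [List.drop_eq_getElem_cons (show 2 * j < l.length by omega),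
            List.drop_eq_getElem_cons (show 2 * j + 1 < l.length by omega),
            show 2 * j + 1 + 1 = 2 * (j + 1) by omega, pvPairs,
            pvGet l _ (2 * j) (by push_cast; ring) (by omega),
            pvGet l _ (2 * j + 1) (by push_cast; ring) (by omega)]
        simp

lemma mapB (l : List Int) : ∀ (m j : Nat),
    l.length ≤ 2 * j + m →
    (PySem.List.pyRange (2 * (j : Int)) ((l.length : Int) - 1) 2).map
      (fun i => PySem.List.pyGetD l i 0 * 256 + PySem.List.pyGetD l (i + 1) 0)
    = pvPairs (l.drop (2 * j)) := by
  intro m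
  induction m with
  | zero =>
    intro j h
    rw [pyRange_two_nil _ _ (by omega), List.map_nil, pvPairs_short _ (by simp; omega)]
  | succ m ih =>
    intro j h
    by_cases h1 : l.length ≤ 2 * j + 1
    · rw [pyRange_two_nil _ _ (by omega), List.map_nil, pvPairs_short _ (by simp; omega)]
    · have hlt : 2 * j + 2 ≤ l.length := by omega
      rw [pyRange_two_cons _ _ (by omega), List.map_cons]
      have e3 : (2 * (j : Int) + 2) = 2 * ((j + 1 : Nat) : Int) := by push_cast; ring
      rw [e3, ih (j + 1) (by omega)]
      rw [List.drop_eq_getElem_cons (show 2 * j < l.length by omega),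
          List.drop_eq_getElem_cons (show 2 * j + 1 < l.length by omega),
          show 2 * j + 1 + 1 = 2 * (j + 1) by omega, pvPairs,
          pvGet l _ (2 * j) (by push_cast; ring) (by omega),
          pvGet l _ (2 * j + 1) (by push_cast; ring) (by omega)]

-- ===== VERDICT (by name: the statement is the Claim_ definition above) =====
theorem addBytes_spec : Claim_equal_addBytes := by
  intro list8bit _
  unfold Spec_addBytes addBytes addBytes_alt
  have hg : (if list8bit.length / 2 = 0 then list8bit ++ [0] else list8bit)
      = (if list8bit.length < 2 then list8bit ++ [0] else list8bit) := by
    by_cases h : list8bit.length < 2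
    · rw [if_pos (by omega), if_pos h]
    · rw [if_neg (by omega), if_neg h]
  simp only [hg]
  set l := if list8bit.length < 2 then list8bit ++ [0] else list8bit with hl
  have hA := foldA l l.length 0 0 [] (by omega)
  have hB := mapB l l.length 0 (by omega)
  simp only [Nat.cast_zero, mul_zero, List.drop_zero, List.nil_append] at hA hB
  rw [hA, hB]
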